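-- pv_equiv track=rewrite | github.com/mantidproject/mantid | scripts/Muon/GUI/Common/utilities/run_string_utils.py | run_list_to_string
-- ===== SOURCE A (Python) =====
-- from itertools import groupby
-- from operator import itemgetter
-- import functools
--
-- delimiter = ","
--
-- range_separator = "-"
--
-- def _remove_duplicates_from_list(run_list):
--     return list(set(run_list))
--
-- def lambda_tuple_unpacking(lam):
--     @functools.wraps(lam)
--     def f_inner(args):
--         return lam(*args)
--
--     return f_inner
--
-- def run_list_to_string(run_list, max_value = True):
--     """
--     Converts a list of runs into a formatted string using a delimiter/range separator
--     :param run_list: list of integers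
--     :return: string representation
--     """
--     if not isinstance(run_list, list):
--         run_list = [run_list]
--     run_list = _remove_duplicates_from_list(run_list)
--     run_list = [i for i in run_list if i >= 0]
--     run_list.sort()
--
--     range_list = []
--     # use groupby to group run_list into sublists of sequential integers. e.g. [50, 49, 48, 3, 2, 1] will turn into
--     # "1-3,48-50"
--     for _, grouped_list in groupby(enumerate(run_list), key=lambda_tuple_unpacking(lambda i, x: i - x)):
--         concurrent_range = list(map(itemgetter(1), grouped_list))
--         if len(concurrent_range) > 1:
--             range_list += [str(concurrent_range[0]) + range_separator + str(concurrent_range[-1])]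
--         else:
--             range_list += [str(concurrent_range[0])]
--     return delimiter.join(range_list)
-- ===== SOURCE B (Python) =====
-- delimiter = ","
-- range_separator = "-"
--
--
-- def run_list_to_string(run_list, max_value=True):
--     """Same formatting as A, but the runs are detected by one explicit
--     start/prev scan instead of itertools.groupby over enumerate keys."""
--     if not isinstance(run_list, list):
--         run_list = [run_list]
--     values = sorted(set(i for i in run_list if i >= 0))
--     if not values:
--         return ""
--     parts = []
--     start = prev = values[0]
--     for x in values[1:]:
--         if x == prev + 1:
--             prev = x
--         else:
--             parts.append(str(start) + range_separator + str(prev) if start != prev else str(start))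
--             start = prev = x
--     parts.append(str(start) + range_separator + str(prev) if start != prev else str(start))
--     return delimiter.join(parts)
-- ===== Notes on version B (the rewrite author's own statement) =====
-- stated objective: simpler
-- what changed: Replaces the itertools.groupby-over-enumerate index-offset trick with a plain single-pass start/prev scan that emits each run when the sequence breaks and flushes the last run after the loop.
import Mathlib
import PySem

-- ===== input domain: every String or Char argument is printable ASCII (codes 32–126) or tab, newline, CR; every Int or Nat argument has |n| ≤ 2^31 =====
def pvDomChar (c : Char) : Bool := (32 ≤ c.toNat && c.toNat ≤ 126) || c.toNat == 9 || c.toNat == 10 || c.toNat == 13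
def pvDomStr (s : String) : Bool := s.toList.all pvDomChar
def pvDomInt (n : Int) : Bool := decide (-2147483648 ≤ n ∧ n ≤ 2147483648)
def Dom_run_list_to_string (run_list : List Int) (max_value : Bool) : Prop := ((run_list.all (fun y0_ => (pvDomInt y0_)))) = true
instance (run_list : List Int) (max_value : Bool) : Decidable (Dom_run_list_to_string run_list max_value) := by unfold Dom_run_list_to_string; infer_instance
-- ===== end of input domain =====

-- B replaces A's itertools.groupby-over-enumerate run detection by a single explicit
-- start/prev scan (objective: simpler); same preamble (dedup, filter i>=0, sort), same output.

-- ===== PORT A =====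
-- itertools.groupby(enumerate(run_list), key=lambda (i, x): i - x): maximal blocks of equal key
def pvGroupRuns : List (Int × Int) → List (List (Int × Int))
  | [] => []
  | p :: rest =>
    (p :: rest.takeWhile (fun q => q.1 - q.2 == p.1 - p.2)) ::
      pvGroupRuns (rest.dropWhile (fun q => q.1 - q.2 == p.1 - p.2))
termination_by l => l.length
decreasing_by
  exact Nat.lt_succ_of_le (List.length_dropWhile_le _ _)

-- the loop body: concurrent_range = list(map(itemgetter(1), grouped_list)); emit "a-b" or "a"
-- (headD/getLastD defaults are never used: every group produced by pvGroupRuns is nonempty)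
def pvGroupStr (g : List (Int × Int)) : String :=
  let concurrent_range := g.map (·.2)
  if 1 < concurrent_range.length then
    PySem.Int.toStr (concurrent_range.headD 0) ++ "-" ++ PySem.Int.toStr (concurrent_range.getLastD 0)
  else
    PySem.Int.toStr (concurrent_range.headD 0)

def run_list_to_string (run_list : List Int) (max_value : Bool) : String :=
  -- run_list is typed List Int, so the isinstance wrap never fires
  let rl1 := PySem.Set.ofList run_list                    -- list(set(run_list))
  let rl2 := rl1.filter (fun i => decide (0 ≤ i))         -- [i for i in run_list if i >= 0]
  let rl3 := PySem.List.sorted rl2 (fun x => x) false     -- run_list.sort()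
  let range_list := (pvGroupRuns (PySem.List.enumerate rl3)).foldl
    (fun acc g => acc ++ [pvGroupStr g]) []
  PySem.Str.join "," range_list

-- ===== PORT B =====
def pvEmit (start prev : Int) : String :=
  if start ≠ prev then PySem.Int.toStr start ++ "-" ++ PySem.Int.toStr prev
  else PySem.Int.toStr start

-- 'for x in values[1:]' with state (start, prev), flushing on a break and at the end
def pvScan (start prev : Int) : List Int → List String
  | [] => [pvEmit start prev]
  | x :: xs => if x = prev + 1 then pvScan start x xs else pvEmit start prev :: pvScan x x xs

def run_list_to_string_alt (run_list : List Int) (max_value : Bool) : String :=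
  let values := PySem.List.sorted
    (PySem.Set.ofList (run_list.filter (fun i => decide (0 ≤ i)))) (fun x => x) false
  match values with
  | [] => ""
  | v :: vs => PySem.Str.join "," (pvScan v v vs)

-- ===== PRECONDITION & SPEC =====
def Spec_run_list_to_string (run_list : List Int) (max_value : Bool) (out : String) : Prop := out = run_list_to_string_alt run_list max_value
instance (run_list : List Int) (max_value : Bool) (out : String) : Decidable (Spec_run_list_to_string run_list max_value out) := by unfold Spec_run_list_to_string; infer_instance

-- ===== CLAIM (what is proved, stated in full; the proofs are below) =====
def Claim_equal_run_list_to_string : Prop := ∀ (run_list : List Int) (max_value : Bool), Dom_run_list_to_string run_list max_value → Spec_run_list_to_string run_list max_value (run_list_to_string run_list max_value)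

-- ===== LEMMAS AND PROOFS =====

-- the maximal consecutive run following p, and what remains after it
def pvRun : Int → List Int → List Int
  | _, [] => []
  | p, y :: ys => if y = p + 1 then y :: pvRun y ys else []

def pvRest : Int → List Int → List Int
  | _, [] => []
  | p, y :: ys => if y = p + 1 then pvRest y ys else y :: ys

theorem pvRest_length_le (xs : List Int) : ∀ p, (pvRest p xs).length ≤ xs.length := by
  induction xs with
  | nil => intro p; simp [pvRest]
  | cons y ys ih =>
    intro p
    simp only [pvRest]
    split
    · exact Nat.le_succ_of_le (ih y)
    · exact Nat.le_refl _

theorem pv_takeWhile (xs : List Int) : ∀ (n p c : Int), c = n - (p + 1) →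
    (PySem.List.enumerate xs n).takeWhile (fun q => q.1 - q.2 == c)
      = PySem.List.enumerate (pvRun p xs) n := by
  induction xs with
  | nil => intro n p c _; simp [PySem.List.enumerate_nil, pvRun]
  | cons y ys ih =>
    intro n p c hc
    rw [PySem.List.enumerate_cons]
    by_cases hy : y = p + 1
    · have hpred : ((n, y).1 - (n, y).2 == c) = true := by
        simp only [beq_iff_eq]; omega
      rw [List.takeWhile_cons, if_pos hpred, pvRun, if_pos hy,
        PySem.List.enumerate_cons, ih (n + 1) y c (by omega)]
    · have hpred : ((n, y).1 - (n, y).2 == c) = false := by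
        simp only [beq_eq_false_iff_ne]; omega
      rw [List.takeWhile_cons, if_neg (by simp [hpred]), pvRun, if_neg hy,
        PySem.List.enumerate_nil]

theorem pv_dropWhile (xs : List Int) : ∀ (n p c : Int), c = n - (p + 1) →
    (PySem.List.enumerate xs n).dropWhile (fun q => q.1 - q.2 == c)
      = PySem.List.enumerate (pvRest p xs) (n + (pvRun p xs).length) := by
  induction xs with
  | nil => intro n p c _; simp [PySem.List.enumerate_nil, pvRest, pvRun]
  | cons y ys ih =>
    intro n p c hc
    rw [PySem.List.enumerate_cons]
    by_cases hy : y = p + 1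
    · have hpred : ((n, y).1 - (n, y).2 == c) = true := by
        simp only [beq_iff_eq]; omega
      rw [List.dropWhile_cons, if_pos hpred, pvRest, if_pos hy,
        ih (n + 1) y c (by omega), pvRun, if_pos hy]
      congr 1
      simp only [List.length_cons]
      push_cast
      ring
    · have hpred : ((n, y).1 - (n, y).2 == c) = false := by
        simp only [beq_eq_false_iff_ne]; omega
      rw [List.dropWhile_cons, if_neg (by simp [hpred]), pvRest, if_neg hy,
        pvRun, if_neg hy]
      simp [PySem.List.enumerate_cons]

-- one unfolding of pvGroupRuns on an enumerated nonempty list, in terms of pvRun/pvRest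
theorem pvGroupRuns_enumerate (x : Int) (xs : List Int) (n : Int) :
    pvGroupRuns (PySem.List.enumerate (x :: xs) n)
      = PySem.List.enumerate (x :: pvRun x xs) n ::
        pvGroupRuns (PySem.List.enumerate (pvRest x xs) (n + 1 + (pvRun x xs).length)) := by
  rw [PySem.List.enumerate_cons, pvGroupRuns]
  rw [show (fun q : Int × Int => q.1 - q.2 == (n, x).1 - (n, x).2)
        = (fun q : Int × Int => q.1 - q.2 == n - x) from rfl]
  rw [pv_takeWhile xs (n + 1) x (n - x) (by omega),
    pv_dropWhile xs (n + 1) x (n - x) (by omega),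
    PySem.List.enumerate_cons]

theorem pvRun_getLast? (xs : List Int) : ∀ x, pvRun x xs ≠ [] →
    (pvRun x xs).getLast? = some (x + (pvRun x xs).length) := by
  induction xs with
  | nil => intro x h; simp [pvRun] at h
  | cons y ys ih =>
    intro x hne
    by_cases hy : y = x + 1
    · rw [pvRun, if_pos hy]
      cases hr : pvRun y ys with
      | nil => simp [hy]
      | cons z zs =>
        have hlast := ih y (by simp [hr])
        rw [hr] at hlast
        rw [List.getLast?_cons_cons, hlast]
        simp only [Option.some.injEq, List.length_cons]
        push_cast
        omega
    · exact absurd (by rw [pvRun, if_neg hy]) hne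

-- A's group string equals B's emit on the run's endpoints
theorem pvGroupStr_run (x : Int) (xs : List Int) (n : Int) :
    pvGroupStr (PySem.List.enumerate (x :: pvRun x xs) n)
      = pvEmit x (x + (pvRun x xs).length) := by
  unfold pvGroupStr
  rw [PySem.List.map_snd_enumerate]
  cases h : pvRun x xs with
  | nil => simp [pvEmit]
  | cons z zs =>
    have hlast := pvRun_getLast? xs x (by simp [h])
    rw [h] at hlast
    have h2 : (x :: z :: zs).getLastD 0 = x + ((z :: zs).length : Int) := by
      rw [List.getLastD_eq_getLast?, List.getLast?_cons_cons, hlast]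
      rfl
    simp only [List.headD_cons, h2, pvEmit]
    rw [if_pos (by simp), if_pos (by simp only [List.length_cons]; push_cast; omega)]

-- B's scan, re-expressed through the same run decomposition
theorem pvScan_run (xs : List Int) : ∀ start prev,
    pvScan start prev xs
      = pvEmit start (prev + (pvRun prev xs).length) ::
        (match pvRest prev xs with
         | [] => []
         | y :: ys => pvScan y y ys) := by
  induction xs with
  | nil => intro start prev; simp [pvScan, pvRun, pvRest]
  | cons y ys ih =>
    intro start prev
    simp only [pvScan, pvRun, pvRest]
    by_cases hy : y = prev + 1
    · rw [if_pos hy, if_pos hy, if_pos hy, ih start y]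
      have : prev + ((y :: pvRun y ys).length : Int) = y + ((pvRun y ys).length : Int) := by
        simp only [List.length_cons]; push_cast; omega
      rw [this]
    · rw [if_neg hy, if_neg hy, if_neg hy]
      simp

-- main agreement on an arbitrary value list, bounded by fuel = list length
theorem pv_main_aux (k : Nat) : ∀ (xs : List Int) (x n : Int), xs.length ≤ k →
    (pvGroupRuns (PySem.List.enumerate (x :: xs) n)).map pvGroupStr = pvScan x x xs := by
  induction k with
  | zero =>
    intro xs x n hk
    have : xs = [] := by cases xs <;> simp_all
    subst this
    rw [pvGroupRuns_enumerate, List.map_cons, pvGroupStr_run]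
    simp [pvRun, pvRest, PySem.List.enumerate_nil, pvGroupRuns, pvScan]
  | succ k ih =>
    intro xs x n hk
    rw [pvGroupRuns_enumerate, List.map_cons, pvGroupStr_run, pvScan_run]
    cases hrest : pvRest x xs with
    | nil => simp [hrest, PySem.List.enumerate_nil, pvGroupRuns]
    | cons y ys =>
      have hlen : ys.length ≤ k := by
        have := pvRest_length_le xs x
        rw [hrest] at this
        simp at this
        omega
      rw [ih ys y _ hlen]

-- B's value list is A's: dedup-then-filter is a permutation of filter-then-dedup, and both are Nodup
theorem pv_values_eq (run_list : List Int) :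
    PySem.List.sorted ((PySem.Set.ofList run_list).filter (fun i => decide (0 ≤ i))) (fun x => x) false
      = PySem.List.sorted (PySem.Set.ofList (run_list.filter (fun i => decide (0 ≤ i)))) (fun x => x) false := by
  apply PySem.List.sorted_eq_sorted_of_perm _ _ _ (fun a b h => h)
  rw [List.perm_ext_iff_of_nodup (List.Nodup.filter _ (PySem.Set.nodup_ofList _))
    (PySem.Set.nodup_ofList _)]
  intro a
  simp [PySem.Set.mem_ofList, List.mem_filter]

-- ===== VERDICT (by name: the statement is the Claim_ definition above) =====
theorem run_list_to_string_spec : Claim_equal_run_list_to_string := by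
  intro run_list max_value _
  unfold Spec_run_list_to_string run_list_to_string run_list_to_string_alt
  simp only []
  rw [PySem.List.foldl_append_singleton_eq_map, pv_values_eq]
  cases h : PySem.List.sorted (PySem.Set.ofList (run_list.filter (fun i => decide (0 ≤ i)))) (fun x => x) false with
  | nil => simp [PySem.List.enumerate_nil, pvGroupRuns, PySem.Str.join]
  | cons v vs =>
    rw [pv_main_aux vs.length vs v 0 (Nat.le_refl _)]
    simp
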